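-- pv_equiv track=rewrite | github.com/caizhilidiji/LogDTL | myData/getRawLog.py | getSnortLog
-- ===== SOURCE A (Python) =====
-- def getSnortLog(lines):
--     logs = []
--     current_log = ""
--     for line in lines:
--         if line.strip() == "":
--             logs.append(current_log.strip().replace('\n', ' '))
--             current_log = ""
--         else:
--             current_log += line
--     return logs
-- ===== SOURCE B (Python) =====
-- def getSnortLog(lines):
--     lines = list(lines)
--     # phase 1: index table of all blank-line delimiter positions
--     breaks = [i for i, line in enumerate(lines) if line.strip() == ""]
--     # phase 2: slice between consecutive delimiters and join
--     logs = []
--     start = 0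
--     for b in breaks:
--         logs.append("".join(lines[start:b]).strip().replace('\n', ' '))
--         start = b + 1
--     return logs
-- ===== Notes on version B (the rewrite author's own statement) =====
-- stated objective: alternative
-- what changed: Replaces the single-pass accumulate-and-flush string builder with a two-phase decomposition: first build an index table of blank-line positions, then slice the line list between consecutive delimiters and join each slice.
import Mathlib
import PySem

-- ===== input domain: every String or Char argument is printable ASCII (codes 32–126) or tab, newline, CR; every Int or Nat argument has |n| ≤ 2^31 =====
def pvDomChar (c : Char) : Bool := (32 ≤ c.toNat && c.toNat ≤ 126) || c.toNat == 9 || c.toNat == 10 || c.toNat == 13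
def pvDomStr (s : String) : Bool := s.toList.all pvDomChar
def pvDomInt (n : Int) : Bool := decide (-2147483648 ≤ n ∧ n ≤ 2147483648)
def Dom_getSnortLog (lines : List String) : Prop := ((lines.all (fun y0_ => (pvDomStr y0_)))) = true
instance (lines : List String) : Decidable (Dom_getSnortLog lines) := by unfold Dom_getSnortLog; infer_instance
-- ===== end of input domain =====

-- B replaces A's single-pass accumulate-and-flush string builder by a two-phase decomposition
-- (build the index table of blank-line positions, then slice between consecutive delimiters and
-- join each slice); objective: alternative (same cost).

-- shared helper: current_log.strip().replace('\n', ' ')  (identical text in both sources)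
def pvEmit (s : String) : String := PySem.Str.replace (PySem.Str.strip s) "\n" " "

-- ===== PORT A =====
-- loop body of A's for-loop: state = (logs, current_log)
def pvStepA (st : List String × String) (line : String) : List String × String :=
  if PySem.Str.strip line = "" then (st.1 ++ [pvEmit st.2], "") else (st.1, st.2 ++ line)

def getSnortLog (lines : List String) : List String :=
  (lines.foldl pvStepA ([], "")).1

-- ===== PORT B =====
-- loop body of B's phase-2 loop over the break indices: state = (logs, start)
def pvStepB (lines : List String) (st : List String × Int) (b : Int) : List String × Int :=
  (st.1 ++ [pvEmit (PySem.Str.join "" (PySem.List.slice lines (some st.2) (some b)))], b + 1)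

def getSnortLog_alt (lines : List String) : List String :=
  let breaks := ((PySem.List.enumerate lines).filter
      (fun p => decide (PySem.Str.strip p.2 = ""))).map (fun p => p.1)
  (breaks.foldl (pvStepB lines) ([], 0)).1

-- ===== PRECONDITION & SPEC =====
def Spec_getSnortLog (lines : List String) (out : List String) : Prop := out = getSnortLog_alt lines
instance (lines : List String) (out : List String) : Decidable (Spec_getSnortLog lines out) := by unfold Spec_getSnortLog; infer_instance

-- ===== CLAIM (what is proved, stated in full; the proofs are below) =====
def Claim_equal_getSnortLog : Prop := ∀ (lines : List String), Dom_getSnortLog lines → Spec_getSnortLog lines (getSnortLog lines)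

-- ===== LEMMAS AND PROOFS =====

-- common recursive reference form of the computation
def pvR : List String → String → List String
  | [], _ => []
  | l :: ls, cur =>
      if PySem.Str.strip l = "" then pvEmit cur :: pvR ls "" else pvR ls (cur ++ l)

-- blank-line positions of the list, starting at absolute index k (Int, as enumerate yields)
def pvBlanks : List String → Int → List Int
  | [], _ => []
  | l :: ls, k =>
      if PySem.Str.strip l = "" then k :: pvBlanks ls (k + 1) else pvBlanks ls (k + 1)

theorem pvCharsJoin_append_singleton (ps : List (List Char)) (q : List Char) :
    PySem.Chars.join [] (ps ++ [q]) = PySem.Chars.join [] ps ++ q := by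
  induction ps with
  | nil => simp [PySem.Chars.join_singleton, PySem.Chars.join_nil]
  | cons p ps ih =>
      cases ps with
      | nil =>
          simp [PySem.Chars.join_cons_cons, PySem.Chars.join_singleton]
      | cons a t =>
          simp only [List.cons_append, PySem.Chars.join_cons_cons]
          rw [show (a :: t) ++ [q] = a :: (t ++ [q]) from rfl] at ih
          rw [ih]
          simp [List.append_assoc]

theorem pvStrJoin_append_singleton (xs : List String) (x : String) :
    PySem.Str.join "" (xs ++ [x]) = PySem.Str.join "" xs ++ x := by
  rw [← String.toList_inj]
  simp [PySem.Str.toList_join, String.toList_append, pvCharsJoin_append_singleton]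

theorem pvStrJoin_nil : PySem.Str.join "" ([] : List String) = "" := rfl

-- A's fold equals the reference form
theorem pvA_fold (lines : List String) :
    ∀ (logs : List String) (cur : String),
      (lines.foldl pvStepA (logs, cur)).1 = logs ++ pvR lines cur := by
  induction lines with
  | nil => intro logs cur; simp [pvR]
  | cons l ls ih =>
      intro logs cur
      by_cases h : PySem.Str.strip l = ""
      · simp [List.foldl_cons, pvStepA, h, pvR, ih]
      · simp [List.foldl_cons, pvStepA, h, pvR, ih]

-- B's break table equals pvBlanks
theorem pvBreaks_eq (lines : List String) :
    ∀ (s : Int),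
      ((PySem.List.enumerate lines s).filter
          (fun p => decide (PySem.Str.strip p.2 = ""))).map (fun p => p.1)
        = pvBlanks lines s := by
  induction lines with
  | nil => intro s; simp [PySem.List.enumerate, pvBlanks]
  | cons l ls ih =>
      intro s
      rw [PySem.List.enumerate_cons]
      by_cases h : PySem.Str.strip l = ""
      · simp [h, pvBlanks, ih]
      · simp [h, pvBlanks, ih]

-- B's phase-2 fold over the break table equals the reference form
theorem pvB_fold (lines : List String) :
    ∀ (suf : List String) (p start : Nat) (logs : List String),
      List.drop p lines = suf → start ≤ p →
      ((pvBlanks suf (p : Int)).foldl (pvStepB lines) (logs, (start : Int))).1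
        = logs ++ pvR suf (PySem.Str.join "" (List.take (p - start) (List.drop start lines))) := by
  intro suf
  induction suf with
  | nil => intro p start logs _ _; simp [pvBlanks, pvR]
  | cons l ls ih =>
      intro p start logs hdrop hle
      have hlt : p < lines.length := by
        by_contra hge
        have : List.drop p lines = [] := List.drop_eq_nil_of_le (by omega)
        rw [this] at hdrop; exact absurd hdrop (by simp)
      have hget : lines[p]? = some l := by
        have h0 : (List.drop p lines)[0]? = some l := by rw [hdrop]; rfl
        rw [List.getElem?_drop] at h0; simpa using h0
      have hls : List.drop (p + 1) lines = ls := by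
        have : List.drop 1 (List.drop p lines) = ls := by rw [hdrop]; rfl
        rwa [List.drop_drop] at this
      have hcast : (p : Int) + 1 = ((p + 1 : Nat) : Int) := by push_cast; ring
      by_cases h : PySem.Str.strip l = ""
      · -- delimiter at index p: emit lines[start:p], restart at p+1
        simp only [pvBlanks, if_pos h, List.foldl_cons]
        have hslice : PySem.List.slice lines (some (start : Int)) (some (p : Int))
            = List.take (p - start) (List.drop start lines) :=
          PySem.List.slice_natCast lines start p
        have hstep : pvStepB lines (logs, (start : Int)) (p : Int)
            = (logs ++ [pvEmit (PySem.Str.join "" (List.take (p - start) (List.drop start lines)))],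
               ((p + 1 : Nat) : Int)) := by
          unfold pvStepB
          rw [hslice, hcast]
        rw [hstep, hcast, ih (p + 1) (p + 1) _ hls (le_refl _)]
        simp [pvR, h, pvStrJoin_nil, List.append_assoc]
      · -- ordinary line: it joins the pending slice
        simp only [pvBlanks, if_neg h]
        rw [hcast, ih (p + 1) start logs hls (by omega)]
        have harith : p + 1 - start = (p - start) + 1 := by omega
        have htake : List.take (p + 1 - start) (List.drop start lines)
            = List.take (p - start) (List.drop start lines) ++ [l] := by
          rw [harith, List.take_add_one, List.getElem?_drop]
          have : start + (p - start) = p := by omega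
          rw [this, hget]; rfl
        rw [htake, pvStrJoin_append_singleton]
        simp [pvR, h]

-- ===== VERDICT (by name: the statement is the Claim_ definition above) =====
theorem getSnortLog_spec : Claim_equal_getSnortLog := by
  intro lines _
  unfold Spec_getSnortLog getSnortLog
  have halt : getSnortLog_alt lines
      = ((((PySem.List.enumerate lines).filter
            (fun p => decide (PySem.Str.strip p.2 = ""))).map (fun p => p.1)).foldl
          (pvStepB lines) ([], 0)).1 := rfl
  rw [pvA_fold lines [] "", halt, pvBreaks_eq lines 0]
  have h0 : (0 : Int) = ((0 : Nat) : Int) := rfl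
  rw [h0, pvB_fold lines lines 0 0 [] (by simp) (le_refl 0)]
  simp [pvStrJoin_nil]
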